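-- pv_equiv track=rewrite | github.com/wppply/LeetCode-in-Python | goldmanOA.py | reverseExp
-- ===== SOURCE A (Python) =====
-- def reverse(arr, i, j):
--     while i < j:
--         arr[i], arr[j] = arr[j], arr[i]
--         i += 1
--         j -= 1
--
-- def reverseExp(arr):
--     if len(arr) < 2:
--         return arr
--
--     arr = list(arr)
--     i, j = 0, 1
--     while j < len(arr):
--         if arr[j] in ['+','-','*','/']:
--             reverse(arr, i, j-1)
--             i = j + 1
--         j += 1
--     return ''.join(arr)
-- ===== SOURCE B (Python) =====
-- def reverseExp(arr):
--     if len(arr) < 2: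
--         return arr
--     out = []
--     token = [arr[0]]
--     for x in arr[1:]:
--         if x in ('+', '-', '*', '/'):
--             out.extend(reversed(token))
--             out.append(x)
--             token = []
--         else:
--             token.append(x)
--     out.extend(token)
--     return ''.join(out)
-- ===== Notes on version B (the rewrite author's own statement) =====
-- stated objective: simpler
-- what changed: A copies the list and does in-place two-pointer segment reversals driven by index bookkeeping (i, j); B is a single pass that buffers the current operand and flushes it reversed at each operator (trailing buffer flushed unreversed, as in A).
-- outside the precondition, e.g. on reverseExp(['ab']): A returns ['ab'], B returns ['ab']
import Mathlib
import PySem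

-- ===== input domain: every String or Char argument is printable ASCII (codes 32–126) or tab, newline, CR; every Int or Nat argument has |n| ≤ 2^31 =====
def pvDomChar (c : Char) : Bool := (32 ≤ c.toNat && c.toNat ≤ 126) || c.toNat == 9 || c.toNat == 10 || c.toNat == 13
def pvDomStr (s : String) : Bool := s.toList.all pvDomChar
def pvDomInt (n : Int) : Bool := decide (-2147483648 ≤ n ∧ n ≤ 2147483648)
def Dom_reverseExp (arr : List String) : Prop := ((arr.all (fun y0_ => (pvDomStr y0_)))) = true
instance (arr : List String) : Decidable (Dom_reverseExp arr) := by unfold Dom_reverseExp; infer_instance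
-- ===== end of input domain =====

-- B replaces A's in-place two-pointer segment reversals with a single pass that
-- accumulates the current operand in a buffer and flushes it reversed at each operator
-- (objective: simpler/alternative decomposition; return-value equivalence — A also copies
-- its argument, so neither mutates the caller's list).


-- ===== PORT A =====
-- helper `reverse(arr, i, j)`: the while-loop swapping arr[i] and arr[j], i += 1, j -= 1
-- (structural on a fuel argument = the loop measure j - i, so the kernel can evaluate it).
def swapA (l : List String) (i j : Nat) : List String :=
  (l.set i (l.getD j "")).set j (l.getD i "")

def revSegAux : Nat → List String → Nat → Nat → List String
  | 0, l, _, _ => l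
  | Nat.succ n, l, i, j => if i < j then revSegAux n (swapA l i j) (i + 1) (j - 1) else l

def revSegA (l : List String) (i j : Nat) : List String := revSegAux (j - i) l i j

-- the main while loop: j scans from 1; on an operator, reverse arr[i..j-1] and set i = j+1
-- (fuel = the loop measure len(arr) - j).
def loopAux : Nat → List String → Nat → Nat → List String
  | 0, l, _, _ => l
  | Nat.succ n, l, i, j =>
    if j < l.length then
      if l.getD j "" ∈ (["+", "-", "*", "/"] : List String) then
        loopAux n (revSegA l i (j - 1)) (j + 1) (j + 1)
      else loopAux n l i (j + 1)
    else l

-- `return arr` for len(arr) < 2 returns the LIST itself (not a str): excluded by Pre_;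
-- that branch is totalized here as the joined list.
def reverseExp (arr : List String) : String :=
  if arr.length < 2 then PySem.Str.join "" arr
  else PySem.Str.join "" (loopAux (arr.length - 1) arr 0 1)

-- ===== PORT B =====
-- one fold step: an operator flushes the reversed token buffer and itself, else buffer x.
def stepB (st : List String × List String) (x : String) : List String × List String :=
  if x ∈ (["+", "-", "*", "/"] : List String) then (st.1 ++ st.2.reverse ++ [x], [])
  else (st.1, st.2 ++ [x])

def reverseExp_alt (arr : List String) : String :=
  if arr.length < 2 then PySem.Str.join "" arr
  else
    match arr with
    | [] => ""
    | a :: rest =>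
      let st := rest.foldl stepB ([], [a])
      PySem.Str.join "" (st.1 ++ st.2)

-- ===== PRECONDITION & SPEC =====
-- Pre_ excludes len(arr) < 2, where A returns the list object itself rather than a str.
def Pre_reverseExp (arr : List String) : Prop := 2 ≤ arr.length
instance (arr : List String) : Decidable (Pre_reverseExp arr) := by unfold Pre_reverseExp; infer_instance
def pvWitness_reverseExp : List String := ["ab", "c", "+", "de"]

def Spec_reverseExp (arr : List String) (out : String) : Prop := out = reverseExp_alt arr
instance (arr : List String) (out : String) : Decidable (Spec_reverseExp arr out) := by unfold Spec_reverseExp; infer_instance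

-- ===== CLAIM (what is proved, stated in full; the proofs are below) =====
def Claim_equal_reverseExp : Prop := ∀ (arr : List String), Dom_reverseExp arr → Pre_reverseExp arr → Spec_reverseExp arr (reverseExp arr)

-- ===== LEMMAS AND PROOFS =====
-- common specification of both loops: process the rest with the current token buffer;
-- an operator flushes the buffer reversed, the trailing buffer is appended unreversed.
def goSpec (tok : List String) : List String → List String
  | [] => tok
  | x :: rest =>
    if x ∈ (["+", "-", "*", "/"] : List String) then tok.reverse ++ x :: goSpec [] rest
    else goSpec (tok ++ [x]) rest

-- B's fold realizes goSpec
theorem foldB_eq (rest : List String) : ∀ (out tok : List String),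
    (rest.foldl stepB (out, tok)).1 ++ (rest.foldl stepB (out, tok)).2 = out ++ goSpec tok rest := by
  induction rest with
  | nil => intro out tok; simp [goSpec]
  | cons x rest ih =>
    intro out tok
    simp only [List.foldl_cons, stepB, goSpec]
    by_cases hx : x ∈ (["+", "-", "*", "/"] : List String)
    · simp only [if_pos hx, ih]; simp
    · simp only [if_neg hx, ih]

-- the swap loop preserves the length of the list
theorem revSegAux_length : ∀ (n : Nat) (l : List String) (i j : Nat),
    (revSegAux n l i j).length = l.length := by
  intro n
  induction n with
  | zero => intro l i j; rfl
  | succ n IH =>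
    intro l i j
    simp only [revSegAux]
    split
    · rw [IH]; simp [swapA]
    · rfl

theorem revSegA_length (l : List String) (i j : Nat) : (revSegA l i j).length = l.length :=
  revSegAux_length ..

-- a no-op of the swap loop already satisfies the segment-reversal formula
theorem revSeg_base (l : List String) (i j : Nat) (h : ¬ i < j) (hij : i ≤ j + 1)
    (hj : j < l.length) :
    l = l.take i ++ ((l.take (j + 1)).drop i).reverse ++ l.drop (j + 1) := by
  rcases Nat.eq_or_lt_of_le hij with hji | hji
  · -- i = j + 1 : empty segment
    subst hji
    simp
  · -- i = j : one-element segment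
    have hji' : i = j := by omega
    subst hji'
    have hseg : (l.take (i + 1)).drop i = l[i]?.toList := by
      rw [List.take_add_one, List.drop_append_of_le_length (by simp; omega)]
      simp
    rw [hseg]
    have hrev : (l[i]?.toList).reverse = l[i]?.toList := by cases l[i]? <;> simp
    rw [hrev, List.append_assoc, ← List.drop_eq_getElem?_toList_append, List.take_append_drop]

-- the swap loop reverses exactly the segment [i, j] (for j < l.length, i ≤ j + 1, enough fuel)
theorem revSegAux_eq : ∀ (n : Nat) (l : List String) (i j : Nat), j ≤ i + n → i ≤ j + 1 →
    j < l.length →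
    revSegAux n l i j = l.take i ++ ((l.take (j + 1)).drop i).reverse ++ l.drop (j + 1) := by
  intro n
  induction n with
  | zero => intro l i j hn hij hj; exact revSeg_base l i j (by omega) hij hj
  | succ n IH =>
    intro l i j hn hij hj
    by_cases h : i < j
    · show (if i < j then revSegAux n (swapA l i j) (i + 1) (j - 1) else l) = _
      rw [if_pos h]
      have hi : i < l.length := by omega
      have hlen : (swapA l i j).length = l.length := by simp [swapA]
      rw [IH (swapA l i j) (i + 1) (j - 1) (by omega) (by omega) (by omega)]
      have hj1 : (j - 1) + 1 = j := by omega
      rw [hj1]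
      have hswap : swapA l i j = (l.set i (l.getD j "")).set j (l.getD i "") := rfl
      have hbval : l[j]? = some (l.getD j "") := by
        rw [List.getD_eq_getElem l "" hj, List.getElem?_eq_getElem hj]
      have haval : l[i]? = some (l.getD i "") := by
        rw [List.getD_eq_getElem l "" hi, List.getElem?_eq_getElem hi]
      rw [hswap]
      -- pieces of the swapped list
      have hbi : ((l.set i (l.getD j "")).set j (l.getD i ""))[i]? = some (l.getD j "") := by
        rw [List.getElem?_set_ne (by omega), List.getElem?_set_self hi]
      have haj : ((l.set i (l.getD j "")).set j (l.getD i ""))[j]? = some (l.getD i "") := by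
        rw [List.getElem?_set_self (by simpa using hj)]
      have htake : ((l.set i (l.getD j "")).set j (l.getD i "")).take i = l.take i := by
        rw [List.take_set, List.take_set, List.set_eq_of_length_le (by simp; omega),
          List.set_eq_of_length_le (by simp)]
      have htake1 : ((l.set i (l.getD j "")).set j (l.getD i "")).take (i + 1)
          = l.take i ++ [l.getD j ""] := by
        rw [List.take_add_one, htake, hbi]
        simp
      have hdrop1 : ((l.set i (l.getD j "")).set j (l.getD i "")).drop (j + 1)
          = l.drop (j + 1) := by
        rw [List.drop_set, if_pos (by omega), List.drop_set, if_pos (by omega)]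
      have hdropj : ((l.set i (l.getD j "")).set j (l.getD i "")).drop j
          = l.getD i "" :: l.drop (j + 1) := by
        rw [List.drop_eq_getElem?_toList_append, haj, hdrop1]
        simp
      have hmid : (((l.set i (l.getD j "")).set j (l.getD i "")).take j).drop (i + 1)
          = (l.take j).drop (i + 1) := by
        rw [List.take_set, List.set_eq_of_length_le (by simp), List.take_set,
          List.drop_set, if_pos (by omega)]
      rw [htake1, hmid, hdropj]
      -- the original segment [i, j] is a :: mid ++ [b]
      have hseg : (l.take (j + 1)).drop i
          = l.getD i "" :: ((l.take j).drop (i + 1) ++ [l.getD j ""]) := by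
        rw [List.take_add_one, hbval, List.drop_append_of_le_length (by simp; omega)]
        rw [List.drop_eq_getElem?_toList_append, List.getElem?_take_of_lt h, haval]
        simp
      rw [hseg]
      simp
    · show (if i < j then revSegAux n (swapA l i j) (i + 1) (j - 1) else l) = _
      rw [if_neg h]
      exact revSeg_base l i j h hij hj

-- covers also j = 0 (where Nat's 0 - 1 = 0 makes revSegA a no-op, as Python's reverse(arr, 0, -1))
theorem revSegA_pred_eq (l : List String) (i j : Nat) (hij : i ≤ j) (hj : j < l.length) :
    revSegA l i (j - 1) = l.take i ++ ((l.take j).drop i).reverse ++ l.drop j := by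
  match j, hij with
  | 0, hij =>
    interval_cases i
    simp [revSegA, revSegAux]
  | (k + 1), hij =>
    have := revSegAux_eq (k - i) l i k (by omega) (by omega) (by omega)
    simpa [revSegA] using this

-- the main while loop realizes goSpec on the part of the list from index i on (enough fuel)
theorem loopAux_eq : ∀ (n : Nat) (l : List String) (i j : Nat), l.length ≤ j + n → i ≤ j →
    loopAux n l i j = l.take i ++ goSpec ((l.take j).drop i) (l.drop j) := by
  intro n
  induction n with
  | zero =>
    intro l i j hn hij
    have hlen : l.length ≤ j := by omega
    show l = _
    rw [List.drop_of_length_le hlen, goSpec, List.take_of_length_le hlen]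
    simp [List.take_append_drop]
  | succ n IH =>
    intro l i j hn hij
    show (if j < l.length then
        if l.getD j "" ∈ (["+", "-", "*", "/"] : List String) then
          loopAux n (revSegA l i (j - 1)) (j + 1) (j + 1)
        else loopAux n l i (j + 1)
      else l) = _
    by_cases hj : j < l.length
    · rw [if_pos hj]
      by_cases hop : l.getD j "" ∈ (["+", "-", "*", "/"] : List String)
      · rw [if_pos hop]
        have hrev := revSegA_pred_eq l i j hij hj
        have hlen : (revSegA l i (j - 1)).length = l.length := revSegA_length ..
        rw [IH (revSegA l i (j - 1)) (j + 1) (j + 1) (by omega) (by omega)]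
        -- pieces of the reversed list l' = (take i ++ seg.reverse) ++ drop j
        have hx : revSegA l i (j - 1) = (l.take i ++ ((l.take j).drop i).reverse) ++ l.drop j := by
          rw [hrev, List.append_assoc]
        have hPR : (l.take i ++ ((l.take j).drop i).reverse).length = j := by simp; omega
        have htakej : (revSegA l i (j - 1)).take j
            = l.take i ++ ((l.take j).drop i).reverse := by
          rw [hx, List.take_left' hPR]
        have hdropj : (revSegA l i (j - 1)).drop j = l.drop j := by
          rw [hx, List.drop_left' hPR]
        have htake : (revSegA l i (j - 1)).take (j + 1) =
            (l.take i ++ ((l.take j).drop i).reverse) ++ [l[j]] := by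
          have h1 : (l.drop j).take 1 = [l[j]] := by
            rw [List.drop_eq_getElem_cons hj, show (1 : Nat) = 0 + 1 from rfl,
              List.take_succ_cons]
            simp
          rw [List.take_add, htakej, hdropj, h1]
        have hdrop : (revSegA l i (j - 1)).drop (j + 1) = l.drop (j + 1) := by
          have h1 : (revSegA l i (j - 1)).drop (j + 1)
              = ((revSegA l i (j - 1)).drop j).drop 1 := by
            rw [List.drop_drop]
          rw [h1, hdropj, List.drop_drop]
        rw [htake, hdrop]
        have hgd : l.getD j "" = l[j] := List.getD_eq_getElem l "" hj
        rw [List.drop_eq_getElem_cons hj, goSpec]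
        rw [if_pos (by rwa [hgd] at hop)]
        simp [List.append_assoc]
        rw [List.drop_eq_nil_of_le (by simp; omega)]
      · rw [if_neg hop, IH l i (j + 1) (by omega) (by omega)]
        have hgd : l.getD j "" = l[j] := List.getD_eq_getElem l "" hj
        rw [List.drop_eq_getElem_cons hj, goSpec, if_neg (by rwa [hgd] at hop)]
        have : (l.take (j + 1)).drop i = (l.take j).drop i ++ [l[j]] := by
          rw [List.take_succ_eq_append_getElem hj,
            List.drop_append_of_le_length (by simp; omega)]
        rw [this]
    · rw [if_neg hj]
      have hlen : l.length ≤ j := by omega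
      rw [List.drop_of_length_le hlen, goSpec, List.take_of_length_le hlen]
      simp [List.take_append_drop]

-- ===== VERDICT (by name: the statement is the Claim_ definition above) =====
theorem reverseExp_spec : Claim_equal_reverseExp := by
  intro arr _ hpre
  unfold Pre_reverseExp at hpre
  unfold Spec_reverseExp reverseExp reverseExp_alt
  rw [if_neg (by omega), if_neg (by omega)]
  match arr, hpre with
  | a :: rest, _ =>
    have hloop := loopAux_eq ((a :: rest).length - 1) (a :: rest) 0 1 (by simp) (by omega)
    rw [hloop]
    simp only []
    rw [foldB_eq rest [] [a]]
    simp
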